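-- pv_equiv track=rewrite | github.com/WonHwang/1D1P | 2021_09_15_Day315/9455.py | movetobottom
-- ===== SOURCE A (Python) =====
-- def movetobottom(grid, x, y):
--
--     count = 0
--
--     while True:
--         if not x or grid[x-1][y]:
--             break
--
--         grid[x][y] = 0
--         grid[x-1][y] = 1
--         x -= 1
--         count += 1
--
--     return count
-- ===== SOURCE B (Python) =====
-- def movetobottom(grid, x, y):
--     count = 0
--     while (x - count) != 0 and not grid[x - count - 1][y]:
--         count += 1
--     if count:
--         grid[x][y] = 0
--         grid[x - count][y] = 1
--     return count
-- ===== Notes on version B (the rewrite author's own statement) =====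
-- stated objective: alternative
-- what changed: B replaces A's per-step clear/set mutation loop with a pure counting scan followed by one guarded O(1) bulk move (grid[x][y]=0; grid[x-count][y]=1), separating the read phase from the write phase.
-- outside the precondition, e.g. on movetobottom([[1], [0], [0]], -1, 0): A returns 1, B returns 1
import Mathlib
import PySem

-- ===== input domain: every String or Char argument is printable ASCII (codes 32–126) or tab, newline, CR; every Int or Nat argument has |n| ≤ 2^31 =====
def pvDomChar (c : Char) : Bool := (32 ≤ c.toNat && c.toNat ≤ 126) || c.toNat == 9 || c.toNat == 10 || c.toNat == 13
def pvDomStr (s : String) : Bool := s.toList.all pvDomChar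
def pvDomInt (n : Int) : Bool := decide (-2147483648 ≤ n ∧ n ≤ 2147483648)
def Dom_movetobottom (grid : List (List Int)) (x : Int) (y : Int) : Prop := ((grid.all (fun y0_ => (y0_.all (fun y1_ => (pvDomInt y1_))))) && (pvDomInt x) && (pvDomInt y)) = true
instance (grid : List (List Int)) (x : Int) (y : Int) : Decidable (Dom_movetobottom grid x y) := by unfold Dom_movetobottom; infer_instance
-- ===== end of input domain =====

-- B separates the scan from the mutation: one pure counting loop, then a single bulk move;
-- both A and B mutate the caller's grid identically, and the claim is about the return value.

-- ===== PORT A =====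
-- A's while loop: step by step, clearing and setting a cell each iteration, carrying the
-- mutated grid; fuel x.toNat+1 suffices since x decreases to 0 inside Pre_.
def movetobottomLoopA (y : Int) : Nat → List (List Int) → Int → Int → Int
  | 0, _, _, count => count
  | fuel+1, grid, x, count =>
    if x = 0 then count
    else if PySem.List.pyGetD (PySem.List.pyGetD grid (x-1) []) y 0 ≠ 0 then count
    else
      -- grid[x][y] = 0 ; grid[x-1][y] = 1  (pySetD/pyGetD are exact on in-range indices; Pre_ keeps them in range)
      let grid1 := PySem.List.pySetD grid x (PySem.List.pySetD (PySem.List.pyGetD grid x []) y 0)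
      let grid2 := PySem.List.pySetD grid1 (x-1) (PySem.List.pySetD (PySem.List.pyGetD grid1 (x-1) []) y 1)
      movetobottomLoopA y fuel grid2 (x-1) (count+1)

def movetobottom (grid : List (List Int)) (x : Int) (y : Int) : Int :=
  movetobottomLoopA y (x.toNat+1) grid x 0

-- ===== PORT B =====
-- B's pure counting loop: the grid is never written while scanning.
def movetobottomCount (grid : List (List Int)) (x y : Int) : Nat → Int → Int
  | 0, count => count
  | fuel+1, count =>
    if x - count = 0 then count
    else if PySem.List.pyGetD (PySem.List.pyGetD grid (x-count-1) []) y 0 ≠ 0 then count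
    else movetobottomCount grid x y fuel (count+1)

-- B then performs its single guarded bulk move (grid[x][y]=0; grid[x-count][y]=1 when count≠0),
-- which does not contribute to the returned value; the return value is the count.
def movetobottom_alt (grid : List (List Int)) (x : Int) (y : Int) : Int :=
  movetobottomCount grid x y (x.toNat+1) 0

-- ===== PRECONDITION & SPEC =====
-- Pre_ covers: x = 0; full in-range columns (A only touches rows 0..x, so y is constrained on
-- those rows only); and scans that break at the very first probe (the probed cell, possibly at
-- a wrapped index, is nonzero), where A returns 0 untouched. It excludes deeper scans through
-- out-of-range or negative indices: there A raises IndexError on some inputs and returns on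
-- others, and no closed-form condition on the input separates the two without replaying the
-- scan (on the excluded inputs where A does return, B returns the same value).
def Pre_movetobottom (grid : List (List Int)) (x : Int) (y : Int) : Prop :=
  x = 0 ∨
  (0 ≤ x ∧ x < (grid.length : Int) ∧
    ∀ row ∈ grid.take (x.toNat + 1), PySem.Raise.InRange row.length y) ∨
  (PySem.Raise.InRange grid.length (x - 1) ∧
    PySem.Raise.InRange (PySem.List.pyGetD grid (x - 1) []).length y ∧
    PySem.List.pyGetD (PySem.List.pyGetD grid (x - 1) []) y 0 ≠ 0)

instance (grid : List (List Int)) (x : Int) (y : Int) : Decidable (Pre_movetobottom grid x y) := by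
  unfold Pre_movetobottom; infer_instance

def pvWitness_movetobottom : List (List Int) × Int × Int := ([[0], [0], [1]], 2, 0)

def Spec_movetobottom (grid : List (List Int)) (x : Int) (y : Int) (out : Int) : Prop := out = movetobottom_alt grid x y
instance (grid : List (List Int)) (x : Int) (y : Int) (out : Int) : Decidable (Spec_movetobottom grid x y out) := by unfold Spec_movetobottom; infer_instance

-- ===== CLAIM (what is proved, stated in full; the proofs are below) =====
def Claim_equal_movetobottom : Prop := ∀ (grid : List (List Int)) (x : Int) (y : Int), Dom_movetobottom grid x y → Pre_movetobottom grid x y → Spec_movetobottom grid x y (movetobottom grid x y)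

-- ===== LEMMAS AND PROOFS =====

-- Two grids of equal length that agree (as getElem?) on all rows below a bound give equal
-- pyGetD reads at nonnegative indices below that bound.
lemma pyGetD_congr_of_agree (g g0 : List (List Int)) (i : Int)
    (hlen : g.length = g0.length) (h0 : 0 ≤ i)
    (hag : ∀ j : Nat, j < g0.length → (j : Int) < i + 1 → g[j]? = g0[j]?) :
    PySem.List.pyGetD g i [] = PySem.List.pyGetD g0 i [] := by
  by_cases hi : i < (g0.length : Int)
  · have hi' : i.toNat < g0.length := by omega
    rw [PySem.List.pyGetD_eq_getElem g [] h0 (by omega),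
        PySem.List.pyGetD_eq_getElem g0 [] h0 (by exact_mod_cast hi)]
    have := hag i.toNat hi' (by omega)
    have h1 : i.toNat < g.length := by omega
    simpa [List.getElem?_eq_getElem, h1, hi'] using this
  · rw [PySem.List.pyGetD_of_none, PySem.List.pyGetD_of_none] <;>
      rw [PySem.List.pyGet?_eq_none_iff] <;>
      simp [PySem.Raise.InRange] <;> omega

-- Core invariant: A's mutated loop equals B's pure count, as long as A has only mutated rows
-- at indices ≥ the current position x0 - count (reads happen strictly below it).
lemma loopA_eq_count (y : Int) (g0 : List (List Int)) (x0 : Int) :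
    ∀ (fuel : Nat) (g : List (List Int)) (count : Int),
      0 ≤ x0 - count →
      g.length = g0.length →
      (∀ j : Nat, j < g0.length → (j : Int) < x0 - count → g[j]? = g0[j]?) →
      movetobottomLoopA y fuel g (x0 - count) count = movetobottomCount g0 x0 y fuel count := by
  intro fuel
  induction fuel with
  | zero => intro g count _ _ _; rfl
  | succ n ih =>
    intro g count hx hlen hag
    rw [movetobottomLoopA, movetobottomCount]
    by_cases h0 : x0 - count = 0
    · simp [h0]
    · have hread : PySem.List.pyGetD g (x0 - count - 1) [] = PySem.List.pyGetD g0 (x0 - count - 1) [] := by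
        apply pyGetD_congr_of_agree _ _ _ hlen (by omega)
        intro j hj hjlt; exact hag j hj (by omega)
      simp only [h0, if_false, hread]
      by_cases hv : PySem.List.pyGetD (PySem.List.pyGetD g0 (x0 - count - 1) []) y 0 ≠ 0
      · simp [hv]
      · simp only [hv, if_false]
        have harith : x0 - count - 1 = x0 - (count + 1) := by omega
        -- the two writes touch rows x0-count and x0-count-1 only; reads stay strictly below
        have hneg : 0 ≤ x0 - (count + 1) := by omega
        have hxnn : 0 ≤ x0 - count := hx
        rw [harith]
        apply ih
        · omega
        · simp [PySem.List.length_pySetD, hlen]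
        · intro j hj hjlt
          rw [PySem.List.pySetD_of_nonneg _ _ hneg, PySem.List.pySetD_of_nonneg _ _ hxnn]
          rw [List.getElem?_set_ne, List.getElem?_set_ne]
          · exact hag j hj (by omega)
          · omega
          · omega

theorem movetobottom_spec : Claim_equal_movetobottom := by
  intro grid x y _ hpre
  unfold Spec_movetobottom movetobottom movetobottom_alt
  rcases hpre with h0 | ⟨hx0, hxlt, _⟩ | ⟨_, _, hcell⟩
  · subst h0
    simp [movetobottomLoopA, movetobottomCount]
  · have := loopA_eq_count y grid x (x.toNat + 1) grid 0 (by omega) rfl (by intro j hj _; rfl)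
    simpa using this
  · -- first probe is a nonzero cell: both sides break immediately with 0
    by_cases hx : x = 0
    · subst hx; simp [movetobottomLoopA, movetobottomCount]
    · rw [movetobottomLoopA, movetobottomCount]
      have h1 : x - 0 - 1 = x - 1 := by omega
      simp [hx, h1, hcell]-- (movetobottom_spec above is the verdict theorem, stated by the claim's name.)
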